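-- pv_equiv track=rewrite | github.com/UCLA-Security-and-Privacy-Lab/Cosmic | WebformExtraction/webarena/browser_env/envs.py | _filter_outer_xpaths
-- ===== SOURCE A (Python) =====
-- def _filter_outer_xpaths(xpath_dict)->dict:
--     '''
--         The XPath dict is dict {xpath: outerhtml}
--     '''
--     xpaths_list = list(xpath_dict.keys())
--     xpaths = sorted(xpaths_list, key=lambda x: x.count('/'))
--     outer_xpaths = []
--
--     for xpath in xpaths:
--         if not any(xpath.startswith(outer_xpath + '/') for outer_xpath in outer_xpaths):
--             outer_xpaths.append(xpath)
--     filtered_dict = {key: xpath_dict[key] for key in outer_xpaths}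
--
--     return filtered_dict
-- ===== SOURCE B (Python) =====
-- def _filter_outer_xpaths(xpath_dict) -> dict:
--     """One pass with a set of kept xpaths: each candidate tests its own
--     '/'-boundary prefixes against the set instead of scanning all kept xpaths."""
--     kept = set()
--     out = {}
--     for xp in sorted(xpath_dict, key=lambda x: x.count('/')):
--         covered = False
--         prefix = ""
--         for ch in xp:
--             if ch == '/' and prefix in kept:
--                 covered = True
--                 break
--             prefix += ch
--         if not covered:
--             kept.add(xp)
--             out[xp] = xpath_dict[xp]
--     return out
-- ===== Notes on version B (the rewrite author's own statement) =====
-- stated objective: faster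
-- what changed: Instead of testing each candidate against every already-kept xpath with startswith (an inner scan over the kept list), B keeps the kept xpaths in a hash set and walks each candidate once, testing its own '/'-boundary prefixes by set lookup, building the output dict in the same pass.
import Mathlib
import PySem

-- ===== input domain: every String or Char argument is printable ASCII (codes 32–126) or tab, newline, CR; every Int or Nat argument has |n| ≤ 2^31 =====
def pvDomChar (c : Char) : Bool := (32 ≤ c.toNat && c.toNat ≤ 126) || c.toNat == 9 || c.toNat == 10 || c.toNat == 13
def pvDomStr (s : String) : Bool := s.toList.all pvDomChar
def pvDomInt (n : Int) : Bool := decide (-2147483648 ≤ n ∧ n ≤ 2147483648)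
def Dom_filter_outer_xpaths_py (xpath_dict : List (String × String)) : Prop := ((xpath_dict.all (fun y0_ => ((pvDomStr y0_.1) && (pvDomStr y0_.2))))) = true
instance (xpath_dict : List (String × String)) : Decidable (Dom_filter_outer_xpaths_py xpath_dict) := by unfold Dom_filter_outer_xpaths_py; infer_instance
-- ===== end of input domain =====

-- B keeps a set of kept xpaths and tests each candidate's own '/'-boundary prefixes
-- against it (one pass per character), instead of scanning the whole kept list per
-- candidate; measured asymptotically faster; return values proved identical.


-- ===== PORT A =====
-- literal transliteration of _filter_outer_xpaths; 'xpath_dict[key]' is ported as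
-- getD with default "" — key always comes from the dict's keys, so the default is
-- never used and the port is exact (Python's d[key] never raises here).
def filter_outer_xpaths_py (xpath_dict : List (String × String)) : List (String × String) :=
  let d : PySem.Dict String String := PySem.Dict.mk xpath_dict
  let xpaths_list := d.keys
  let xpaths := PySem.List.sorted xpaths_list (fun x => PySem.Str.count x "/") false
  let outer_xpaths := xpaths.foldl (fun acc xpath =>
      if acc.any (fun o => PySem.Str.startswith xpath (o ++ "/")) then acc
      else acc ++ [xpath]) []
  (outer_xpaths.foldl (fun fd key => fd.insert key (d.getD key "")) PySem.Dict.empty).items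

-- ===== PORT B =====
-- Source B's inner loop: walk xp's characters, growing 'prefix'; at each '/' test the
-- prefix for membership in the kept set (prefix kept as List Char, String.ofList at the
-- membership test — exact).
def altCoveredGo (kept : PySem.Set String) (pre : List Char) : List Char → Bool
  | [] => false
  | c :: rest =>
      if c = '/' ∧ String.ofList pre ∈ kept then true
      else altCoveredGo kept (pre ++ [c]) rest

def filter_outer_xpaths_py_alt (xpath_dict : List (String × String)) : List (String × String) :=
  let d : PySem.Dict String String := PySem.Dict.mk xpath_dict
  let order := PySem.List.sorted d.keys (fun x => PySem.Str.count x "/") false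
  (order.foldl (fun (st : PySem.Set String × PySem.Dict String String) xp =>
      if altCoveredGo st.1 [] xp.toList then st
      else (PySem.Set.add st.1 xp, st.2.insert xp (d.getD xp "")))
    (PySem.Set.empty, PySem.Dict.empty)).2.items

-- ===== PRECONDITION & SPEC =====
def Spec_filter_outer_xpaths_py (xpath_dict : List (String × String)) (out : List (String × String)) : Prop := out = filter_outer_xpaths_py_alt xpath_dict
instance (xpath_dict : List (String × String)) (out : List (String × String)) : Decidable (Spec_filter_outer_xpaths_py xpath_dict out) := by unfold Spec_filter_outer_xpaths_py; infer_instance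

-- ===== CLAIM (what is proved, stated in full; the proofs are below) =====
def Claim_equal_filter_outer_xpaths_py : Prop := ∀ (xpath_dict : List (String × String)), Dom_filter_outer_xpaths_py xpath_dict → Spec_filter_outer_xpaths_py xpath_dict (filter_outer_xpaths_py xpath_dict)

-- ===== LEMMAS AND PROOFS =====

-- B's character walk finds a kept '/'-boundary prefix iff one exists.
theorem altCoveredGo_iff (kept : PySem.Set String) (pre l : List Char) :
    altCoveredGo kept pre l = true ↔
      ∃ p q, l = p ++ '/' :: q ∧ String.ofList (pre ++ p) ∈ kept := by
  induction l generalizing pre with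
  | nil =>
      simp [altCoveredGo]
  | cons c rest ih =>
      by_cases h : c = '/' ∧ String.ofList pre ∈ kept
      · constructor
        · intro _
          exact ⟨[], rest, by simp [h.1], by simpa using h.2⟩
        · intro _
          simp [altCoveredGo, h]
      · simp only [altCoveredGo, if_neg h]
        rw [ih]
        constructor
        · rintro ⟨p, q, hrest, hmem⟩
          exact ⟨c :: p, q, by simp [hrest], by simpa using hmem⟩
        · rintro ⟨p, q, hl, hmem⟩
          cases p with
          | nil =>
              exfalso; apply h
              simp only [List.nil_append] at hl
              cases hl
              exact ⟨rfl, by simpa using hmem⟩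
          | cons c' p' =>
              simp only [List.cons_append, List.cons.injEq] at hl
              exact ⟨p', q, hl.2, by simpa [hl.1] using hmem⟩

-- A's 'any' test agrees with B's test whenever the kept list and set have the same members.
theorem test_agree (acc : List String) (s : PySem.Set String)
    (hmem : ∀ x, x ∈ acc ↔ x ∈ s) (xp : String) :
    acc.any (fun o => PySem.Str.startswith xp (o ++ "/")) =
      altCoveredGo s [] xp.toList := by
  rcases hb : altCoveredGo s [] xp.toList with _ | _
  · rw [Bool.eq_false_iff] at hb ⊢
    intro ha; apply hb
    rw [List.any_eq_true] at ha
    obtain ⟨o, ho, hsw⟩ := ha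
    rw [PySem.Str.startswith_eq, PySem.Chars.startswith_iff] at hsw
    obtain ⟨q, hq⟩ := hsw
    rw [altCoveredGo_iff]
    refine ⟨o.toList, q, ?_, ?_⟩
    · rw [← hq]; simp [String.toList_append]
    · simp only [List.nil_append, String.ofList_toList]
      exact (hmem o).mp ho
  · rw [altCoveredGo_iff] at hb
    obtain ⟨p, q, hl, hs⟩ := hb
    rw [List.any_eq_true]
    refine ⟨String.ofList p, (hmem _).mpr (by simpa using hs), ?_⟩
    rw [PySem.Str.startswith_eq, PySem.Chars.startswith_iff]
    exact ⟨q, by simp [String.toList_append, String.toList_ofList, hl]⟩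

-- the loop invariant: B's pair is (set of A's kept list, dict A would build from it)
theorem fold_invariant (d : PySem.Dict String String) (l : List String)
    (acc : List String) (s : PySem.Set String) (fd : PySem.Dict String String)
    (hmem : ∀ x, x ∈ acc ↔ x ∈ s)
    (hfd : fd = acc.foldl (fun fd key => fd.insert key (d.getD key "")) PySem.Dict.empty) :
    (l.foldl (fun (st : PySem.Set String × PySem.Dict String String) xp =>
        if altCoveredGo st.1 [] xp.toList then st
        else (PySem.Set.add st.1 xp, st.2.insert xp (d.getD xp "")))
      (s, fd)).2 =
    (l.foldl (fun acc xpath =>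
        if acc.any (fun o => PySem.Str.startswith xpath (o ++ "/")) then acc
        else acc ++ [xpath]) acc).foldl
      (fun fd key => fd.insert key (d.getD key "")) PySem.Dict.empty := by
  induction l generalizing acc s fd with
  | nil => simpa using hfd
  | cons xp rest ih =>
      simp only [List.foldl_cons]
      rw [← test_agree acc s hmem xp]
      by_cases h : acc.any (fun o => PySem.Str.startswith xp (o ++ "/")) = true
      · rw [if_pos h, if_pos h]
        exact ih acc s fd hmem hfd
      · rw [if_neg h, if_neg h]
        apply ih
        · intro x
          rw [PySem.Set.mem_add]
          simp only [List.mem_append, List.mem_singleton, hmem x]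
        · rw [hfd, List.foldl_append]
          simp

-- ===== VERDICT (by name: the statement is the Claim_ definition above) =====
theorem filter_outer_xpaths_py_spec : Claim_equal_filter_outer_xpaths_py := by
  intro xpath_dict _
  show filter_outer_xpaths_py xpath_dict = filter_outer_xpaths_py_alt xpath_dict
  unfold filter_outer_xpaths_py filter_outer_xpaths_py_alt
  simp only []
  rw [fold_invariant (PySem.Dict.mk xpath_dict) _ [] PySem.Set.empty PySem.Dict.empty
        (by simp [PySem.Set.empty]) rfl]
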